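-- pv_equiv track=rewrite | github.com/ecpre/aoc-2024 | day09/day9.py | get_free_blocks_p2
-- ===== SOURCE A (Python) =====
-- def get_free_blocks_p2(bmap):
--     freeblocks = []
--     i = 0
--     while i < len(bmap):
--         lastindex = i
--         index = i
--         if bmap[i] != " ":
--             i+=1
--             continue
--         while True:
--             if i > len(bmap)-1:
--                 break
--             elif bmap[i] != " ":
--                 break
--             else:
--                 lastindex = i
--                 i+=1
--         freeblocks.append([index, lastindex+1])
--     return freeblocks
-- ===== SOURCE B (Python) =====
-- def get_free_blocks_p2(bmap):
--     freeblocks = []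
--     start = None
--     for j, c in enumerate(bmap):
--         if c == " ":
--             if start is None:
--                 start = j
--         else:
--             if start is not None:
--                 freeblocks.append([start, j])
--                 start = None
--     if start is not None:
--         freeblocks.append([start, len(bmap)])
--     return freeblocks
-- ===== Notes on version B (the rewrite author's own statement) =====
-- stated objective: simpler
-- what changed: Replaces A's nested two-pointer while-loops (outer index scan plus inner run-extension loop tracking lastindex) with a single for-loop over enumerate(bmap) that keeps an Option run-start and closes an interval when the run ends.
import Mathlib
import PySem

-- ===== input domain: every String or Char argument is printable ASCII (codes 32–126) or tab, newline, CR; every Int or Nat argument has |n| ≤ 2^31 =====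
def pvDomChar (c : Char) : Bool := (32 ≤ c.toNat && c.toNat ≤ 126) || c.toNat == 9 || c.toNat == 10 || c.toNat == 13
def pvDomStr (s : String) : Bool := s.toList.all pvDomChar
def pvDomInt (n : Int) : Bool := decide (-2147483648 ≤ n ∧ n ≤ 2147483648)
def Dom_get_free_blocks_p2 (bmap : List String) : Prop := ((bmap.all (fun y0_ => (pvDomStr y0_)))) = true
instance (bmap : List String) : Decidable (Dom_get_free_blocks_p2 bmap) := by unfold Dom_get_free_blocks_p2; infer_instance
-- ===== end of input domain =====

-- B replaces A's nested two-pointer while-loops by a single fold over enumerate with an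
-- Option-typed run-start accumulator (objective: simpler one-pass decomposition; same cost).

-- ===== PORT A =====
-- inner 'while True' loop of A: state (i, lastindex); returns the state at 'break'.
-- fuel only makes the recursion structural; it is never exhausted when fuel > len - i.
def pvInnerA (bmap : List String) : Nat → Nat → Nat → Nat × Nat
  | 0, i, lastindex => (i, lastindex)
  | fuel + 1, i, lastindex =>
    if bmap.length - 1 < i then (i, lastindex)               -- 'if i > len(bmap)-1: break'
    else if bmap.getD i "" ≠ " " then (i, lastindex)         -- 'elif bmap[i] != " ": break'
    else pvInnerA bmap fuel (i + 1) i                        -- 'lastindex = i; i += 1'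

-- outer 'while i < len(bmap)' loop of A: accumulator freeblocks (same fuel convention)
def pvOuterA (bmap : List String) : Nat → Nat → List (List Int) → List (List Int)
  | 0, _, acc => acc
  | fuel + 1, i, acc =>
    if i < bmap.length then
      if bmap.getD i "" ≠ " " then pvOuterA bmap fuel (i + 1) acc    -- 'i += 1; continue'
      else
        let p := pvInnerA bmap (bmap.length + 1 - i) i i
        pvOuterA bmap fuel p.1 (acc ++ [[(i : Int), (p.2 : Int) + 1]])
    else acc

def get_free_blocks_p2 (bmap : List String) : List (List Int) :=
  pvOuterA bmap (bmap.length + 1) 0 []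

-- ===== PORT B =====
-- one step of B's for-loop over enumerate(bmap); state = (freeblocks, start)
def pvStepB (st : List (List Int) × Option Int) (jc : Int × String) :
    List (List Int) × Option Int :=
  if jc.2 = " " then
    match st.2 with
    | none => (st.1, some jc.1)
    | some _ => st
  else
    match st.2 with
    | none => st
    | some s => (st.1 ++ [[s, jc.1]], none)

def get_free_blocks_p2_alt (bmap : List String) : List (List Int) :=
  let r := (PySem.List.enumerate bmap).foldl pvStepB ([], none)
  match r.2 with
  | none => r.1
  | some s => r.1 ++ [[s, (bmap.length : Int)]]

-- ===== PRECONDITION & SPEC =====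
def Spec_get_free_blocks_p2 (bmap : List String) (out : List (List Int)) : Prop := out = get_free_blocks_p2_alt bmap
instance (bmap : List String) (out : List (List Int)) : Decidable (Spec_get_free_blocks_p2 bmap out) := by unfold Spec_get_free_blocks_p2; infer_instance

-- ===== CLAIM (what is proved, stated in full; the proofs are below) =====
def Claim_equal_get_free_blocks_p2 : Prop := ∀ (bmap : List String), Dom_get_free_blocks_p2 bmap → Spec_get_free_blocks_p2 bmap (get_free_blocks_p2 bmap)

-- ===== LEMMAS AND PROOFS =====

-- B's final 'if start is not None' step
def pvFinishB (bmap : List String) (r : List (List Int) × Option Int) : List (List Int) :=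
  match r.2 with
  | none => r.1
  | some s => r.1 ++ [[s, (bmap.length : Int)]]

-- characterisation of A's inner loop: starting on a space it stops at the first
-- non-space position i' (or the end) with lastindex = i' - 1
theorem pvInnerA_char (bmap : List String) (fuel : Nat) :
    ∀ i lastindex, bmap.length - i < fuel → bmap.getD i "" = " " →
    ∃ i', pvInnerA bmap fuel i lastindex = (i', i' - 1) ∧ i < i' ∧ i' ≤ bmap.length ∧
      (∀ j, i ≤ j → j < i' → bmap.getD j "" = " ") ∧
      (i' = bmap.length ∨ bmap.getD i' "" ≠ " ") := by
  induction fuel with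
  | zero => intro i lastindex hf _; exact absurd hf (Nat.not_lt_zero _)
  | succ fuel ih =>
    intro i lastindex hf h
    have hi : i < bmap.length := by
      by_contra hc
      rw [List.getD_eq_default _ _ (Nat.le_of_not_lt hc)] at h
      simp at h
    have hstep : pvInnerA bmap (fuel + 1) i lastindex = pvInnerA bmap fuel (i + 1) i := by
      rw [pvInnerA, if_neg (show ¬ bmap.length - 1 < i by omega),
          if_neg (not_not_intro h)]
    by_cases h2 : bmap.getD (i + 1) "" = " "
    · obtain ⟨i', he, hlt, hle, hsp, hend⟩ := ih (i + 1) i (by omega) h2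
      refine ⟨i', by rw [hstep, he], by omega, hle, ?_, hend⟩
      intro j hj1 hj2
      rcases Nat.eq_or_lt_of_le hj1 with rfl | hj
      · exact h
      · exact hsp j hj hj2
    · refine ⟨i + 1, ?_, by omega, by omega, ?_, ?_⟩
      · rw [hstep]
        cases fuel with
        | zero => omega   -- fuel ≥ len - i > 0 here, so this case is impossible
        | succ fuel' =>
          rw [pvInnerA]
          by_cases h3 : bmap.length - 1 < i + 1
          · rw [if_pos h3]; simp
          · rw [if_neg h3, if_pos h2]; simp
      · intro j hj1 hj2
        have : j = i := by omega
        simpa [this] using h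
      · by_cases h4 : i + 1 = bmap.length
        · exact Or.inl h4
        · exact Or.inr h2

-- a run of spaces is skipped by B's fold while the run is already open
theorem pvFoldB_spaces (bmap : List String) (k : Nat) :
    ∀ i s acc, i + k ≤ bmap.length →
    (∀ j, i ≤ j → j < i + k → bmap.getD j "" = " ") →
    (PySem.List.enumerate (bmap.drop i) i).foldl pvStepB (acc, some s) =
    (PySem.List.enumerate (bmap.drop (i + k)) ((i : Int) + (k : Int))).foldl pvStepB (acc, some s) := by
  induction k with
  | zero => intro i s acc _ _; simp
  | succ k ih =>
    intro i s acc hle hsp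
    have hi : i < bmap.length := by omega
    rw [List.drop_eq_getElem_cons hi, PySem.List.enumerate_cons]
    have hgi : bmap[i] = " " := by
      have := hsp i (le_refl i) (by omega)
      rwa [List.getD_eq_getElem bmap "" hi] at this
    rw [List.foldl_cons,
        show pvStepB (acc, some s) ((i : Int), bmap[i]) = (acc, some s) by simp [pvStepB, hgi]]
    have hrec := ih (i + 1) s acc (by omega)
      (by intro j hj1 hj2; exact hsp j (by omega) (by omega))
    rw [show ((i : Int) + 1) = ((i + 1 : Nat) : Int) by push_cast; ring, hrec,
        show i + 1 + k = i + (k + 1) by omega,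
        show ((i + 1 : Nat) : Int) + (k : Int) = (i : Int) + ((k + 1 : Nat) : Int) by push_cast; ring]

theorem pvOuterA_eq_fold (bmap : List String) (fuel : Nat) :
    ∀ i acc, bmap.length - i < fuel → pvOuterA bmap fuel i acc =
      pvFinishB bmap ((PySem.List.enumerate (bmap.drop i) i).foldl pvStepB (acc, none)) := by
  induction fuel with
  | zero => intro i acc hf; exact absurd hf (Nat.not_lt_zero _)
  | succ fuel ih =>
    intro i acc hf
    by_cases hi : i < bmap.length
    · rw [List.drop_eq_getElem_cons hi, PySem.List.enumerate_cons, List.foldl_cons]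
      by_cases hc : bmap[i] = " "
      · -- space: A runs the inner loop; B opens a run
        have hgd : bmap.getD i "" = " " := by rwa [List.getD_eq_getElem bmap "" hi]
        obtain ⟨i', he, hlt, hle, hsp, hend⟩ :=
          pvInnerA_char bmap (bmap.length + 1 - i) i i (by omega) hgd
        rw [pvOuterA]
        simp only [if_pos hi, hgd, ne_eq, not_true_eq_false, if_false, he]
        have hA := ih i' (acc ++ [[(i : Int), ((i' - 1 : Nat) : Int) + 1]]) (by omega)
        have hcast : ((i' - 1 : Nat) : Int) + 1 = (i' : Int) := by
          have : (1 : Nat) ≤ i' := by omega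
          push_cast [this]; ring
        rw [hcast] at hA
        rw [hcast, hA]
        -- B side: step opens the run, then skips the spaces up to i'
        rw [show pvStepB (acc, none) ((i : Int), bmap[i]) = (acc, some (i : Int)) by
              simp [pvStepB, hc]]
        have hB := pvFoldB_spaces bmap (i' - (i + 1)) (i + 1) (i : Int) acc
          (by omega) (by intro j hj1 hj2; exact hsp j (by omega) (by omega))
        rw [show (i + 1) + (i' - (i + 1)) = i' by omega] at hB
        rw [show ((i : Int) + 1) = ((i + 1 : Nat) : Int) by push_cast; ring]
        rw [show ((i + 1 : Nat) : Int) + ((i' - (i + 1) : Nat) : Int) = ((i' : Nat) : Int) by omega] at hB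
        rw [hB]
        by_cases hEnd : i' = bmap.length
        · -- run reaches the end of the list
          subst hEnd
          simp [pvFinishB]
        · -- run closed by a non-space at i'
          have hNe := hend.resolve_left hEnd
          have hi' : i' < bmap.length := by omega
          rw [List.drop_eq_getElem_cons hi', PySem.List.enumerate_cons, List.foldl_cons,
              List.foldl_cons]
          have hgi' : ¬ bmap[i'] = " " := by rwa [List.getD_eq_getElem bmap "" hi'] at hNe
          rw [show pvStepB (acc ++ [[(i : Int), (i' : Int)]], none) ((i' : Int), bmap[i']) =
                (acc ++ [[(i : Int), (i' : Int)]], none) by simp [pvStepB, hgi'],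
              show pvStepB (acc, some (i : Int)) ((i' : Int), bmap[i']) =
                (acc ++ [[(i : Int), (i' : Int)]], none) by simp [pvStepB, hgi'],
              show ((i' : Int) + 1) = ((i' + 1 : Nat) : Int) by push_cast; ring]
      · -- non-space, no open run: both sides just advance
        have hgd : bmap.getD i "" ≠ " " := by rwa [List.getD_eq_getElem bmap "" hi]
        rw [pvOuterA]
        simp only [if_pos hi, if_pos hgd]
        rw [ih (i + 1) acc (by omega)]
        rw [show pvStepB (acc, none) ((i : Int), bmap[i]) = (acc, none) by simp [pvStepB, hc],
            show ((i : Int) + 1) = ((i + 1 : Nat) : Int) by push_cast; ring]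
    · rw [pvOuterA, List.drop_eq_nil_of_le (by omega)]
      simp [hi, pvFinishB, PySem.List.enumerate]

-- ===== VERDICT (by name: the statement is the Claim_ definition above) =====
theorem get_free_blocks_p2_spec : Claim_equal_get_free_blocks_p2 := by
  intro bmap _
  unfold Spec_get_free_blocks_p2 get_free_blocks_p2 get_free_blocks_p2_alt
  have := pvOuterA_eq_fold bmap (bmap.length + 1) 0 [] (by omega)
  simpa [pvFinishB] using this
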